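-- pv_equiv track=rewrite | github.com/shyamk01/hackerrank | main.py | checkPatienceStatus
-- ===== SOURCE A (Python) =====
-- def checkPatienceStatus(viruscompo, inpone):
--     arrstr = []
--     flag = 0
--     for pone in inpone:
--         k = 0
--         str = ""
--         for i in range(len(pone)):
--             if set(pone).issubset(set(viruscompo)):
--                 for _ in range(len(viruscompo)):
--                     if k <= len(viruscompo) - 1 and pone[i] == viruscompo[k]:
--                         str = str + pone[i]
--                         break
--                     else:
--                         k = k + 1
--
--         if pone == str:
--             arrstr.append("POSITIVE")
--         elif flag == 0:
--             arrstr.append("NEGATIVE")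
--         else:
--             arrstr.append("NEGATIVE")
--     return arrstr
-- ===== SOURCE B (Python) =====
-- def _matches(viruscompo, pone):
--     # monotone pointer scan; a matched character leaves the pointer on its position,
--     # so repeated characters may reuse the same virus position (matching A's behaviour)
--     k = 0
--     V = len(viruscompo)
--     for c in pone:
--         while k < V and viruscompo[k] != c:
--             k += 1
--         if k == V:
--             return False
--     return True
--
-- def checkPatienceStatus(viruscompo, inpone):
--     return ["POSITIVE" if _matches(viruscompo, pone) else "NEGATIVE" for pone in inpone]
-- ===== Notes on version B (the rewrite author's own statement) =====
-- stated objective: faster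
-- what changed: Replaces A's per-character work (a set-subset test recomputed for every character plus an inner loop over the whole virus string each time, then an equality test of the rebuilt string) with a single monotone two-pointer scan of each input string against viruscompo.
import Mathlib
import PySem

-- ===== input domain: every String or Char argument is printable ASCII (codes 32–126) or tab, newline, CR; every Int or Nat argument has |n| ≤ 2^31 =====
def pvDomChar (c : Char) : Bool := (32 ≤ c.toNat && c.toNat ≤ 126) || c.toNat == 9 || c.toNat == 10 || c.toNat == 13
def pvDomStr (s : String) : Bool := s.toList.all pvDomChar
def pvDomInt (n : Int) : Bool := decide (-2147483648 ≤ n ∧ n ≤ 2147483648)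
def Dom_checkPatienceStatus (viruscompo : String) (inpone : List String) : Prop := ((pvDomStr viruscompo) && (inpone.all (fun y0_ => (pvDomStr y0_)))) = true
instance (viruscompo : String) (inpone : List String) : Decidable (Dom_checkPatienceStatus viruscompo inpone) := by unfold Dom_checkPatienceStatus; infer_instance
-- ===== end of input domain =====

-- B replaces A's per-character rescans (redundant subset test + bounded inner loop) by one
-- monotone two-pointer scan per string: alternative/faster re-implementation, same return value.

-- ===== PORT A =====
-- the inner 'for _ in range(len(viruscompo))' loop: fuel-counted scan advancing k
def innerA (virus : List Char) (c : Char) : Nat → Int → List Char → Int × List Char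
  | 0, k, s => (k, s)
  | fuel + 1, k, s =>
    if k ≤ (virus.length : Int) - 1 ∧ PySem.List.pyGet? virus k = some c then
      (k, s ++ [c])
    else
      innerA virus c fuel (k + 1) s

-- one iteration of A's outer 'for i in range(len(pone))' loop (state = (k, str))
def stepA (virus pone : List Char) (st : Int × List Char) (c : Char) : Int × List Char :=
  if pone.all (fun ch => virus.contains ch) then innerA virus c virus.length st.1 st.2 else st

def classifyA (virus pone : List Char) : String :=
  let r := pone.foldl (stepA virus pone) (0, [])
  if pone = r.2 then "POSITIVE" else if (0 : Int) = 0 then "NEGATIVE" else "NEGATIVE"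

def checkPatienceStatus (viruscompo : String) (inpone : List String) : List String :=
  inpone.foldl (fun arr pone => arr ++ [classifyA viruscompo.toList pone.toList]) []

-- ===== PORT B =====
-- 'while k < V and viruscompo[k] != c: k += 1'
def advB (virus : List Char) (c : Char) (k : Nat) : Nat :=
  if h : k < virus.length then
    if virus[k] = c then k else advB virus c (k + 1)
  else k
termination_by virus.length - k

-- '_matches': pointer scan over pone's characters
def matchesB (virus : List Char) : List Char → Nat → Bool
  | [], _ => true
  | c :: rest, k =>
    let k' := advB virus c k
    if k' = virus.length then false else matchesB virus rest k'

def checkPatienceStatus_alt (viruscompo : String) (inpone : List String) : List String :=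
  inpone.map (fun pone =>
    if matchesB viruscompo.toList pone.toList 0 then "POSITIVE" else "NEGATIVE")

-- ===== PRECONDITION & SPEC =====
def Spec_checkPatienceStatus (viruscompo : String) (inpone : List String) (out : List String) : Prop := out = checkPatienceStatus_alt viruscompo inpone
instance (viruscompo : String) (inpone : List String) (out : List String) : Decidable (Spec_checkPatienceStatus viruscompo inpone out) := by unfold Spec_checkPatienceStatus; infer_instance

-- ===== CLAIM (what is proved, stated in full; the proofs are below) =====
def Claim_equal_checkPatienceStatus : Prop := ∀ (viruscompo : String) (inpone : List String), Dom_checkPatienceStatus viruscompo inpone → Spec_checkPatienceStatus viruscompo inpone (checkPatienceStatus viruscompo inpone)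

-- ===== LEMMAS AND PROOFS =====

theorem advB_le (virus : List Char) (c : Char) (k : Nat) (h : k ≤ virus.length) :
    advB virus c k ≤ virus.length := by
  unfold advB
  split
  · split
    · omega
    · exact advB_le virus c (k + 1) (by omega)
  · omega
termination_by virus.length - k

theorem advB_mem (virus : List Char) (c : Char) (k : Nat)
    (h : advB virus c k < virus.length) : c ∈ virus := by
  unfold advB at h
  by_cases hk : k < virus.length
  · simp only [hk, dite_true] at h
    by_cases he : virus[k] = c
    · exact he ▸ List.getElem_mem hk
    · simp only [he, if_false] at h
      exact advB_mem virus c (k + 1) h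
  · rw [dif_neg hk] at h
    exact absurd h hk
termination_by virus.length - k

-- innerA in a failed state (k past the end) just burns its fuel, leaving str unchanged
theorem innerA_fail (virus : List Char) (c : Char) :
    ∀ (fuel : Nat) (k : Int) (s : List Char), (virus.length : Int) - 1 < k →
      innerA virus c fuel k s = (k + fuel, s) := by
  intro fuel
  induction fuel with
  | zero => intro k s _; simp [innerA]
  | succ n ih =>
    intro k s h
    unfold innerA
    rw [if_neg (fun hc => absurd hc.1 (by omega)), ih (k + 1) s (by omega)]
    congr 1
    push_cast
    ring

-- innerA with full fuel computes exactly advB (matched position kept, or fuel exhausted)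
theorem innerA_eq (virus : List Char) (c : Char) :
    ∀ (fuel k : Nat) (s : List Char), virus.length ≤ k + fuel →
      innerA virus c fuel (k : Int) s =
        if advB virus c k < virus.length then (((advB virus c k : Nat) : Int), s ++ [c])
        else (((k + fuel : Nat) : Int), s) := by
  intro fuel
  induction fuel with
  | zero =>
    intro k s h
    have hk : ¬ k < virus.length := by omega
    have ha : advB virus c k = k := by unfold advB; exact dif_neg hk
    simp only [innerA]
    rw [ha, if_neg hk]
    simp
  | succ n ih =>
    intro k s h
    by_cases hk : k < virus.length
    · have hget : PySem.List.pyGet? virus (k : Int) = some virus[k] := by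
        simp [PySem.List.pyGet?, PySem.List.pyIdx?, hk]
      by_cases he : virus[k] = c
      · unfold innerA
        rw [if_pos ⟨by omega, by rw [hget, he]⟩]
        unfold advB
        simp [hk, he]
      · unfold innerA
        rw [if_neg (by rw [hget]; intro ⟨_, hc⟩; exact he (by injection hc))]
        have : ((k : Int) + 1) = ((k + 1 : Nat) : Int) := by push_cast; ring
        rw [this, ih (k + 1) s (by omega)]
        have hadv : advB virus c k = advB virus c (k + 1) := by
          conv_lhs => rw [advB]
          rw [dif_pos hk, if_neg he]
        rw [hadv]
        have : (k + 1 + n : Nat) = (k + (n + 1) : Nat) := by omega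
        rw [this]
    · have hk' : ¬ ((k : Int) ≤ (virus.length : Int) - 1) := by omega
      unfold innerA
      rw [if_neg (by intro ⟨h1, _⟩; exact hk' h1)]
      have : ((k : Int) + 1) = ((k + 1 : Nat) : Int) := by push_cast; ring
      rw [this, ih (k + 1) s (by omega)]
      have hadv1 : ¬ advB virus c (k + 1) < virus.length := by
        have : advB virus c (k + 1) = k + 1 := by
          unfold advB; exact dif_neg (by omega)
        omega
      have hadv0 : ¬ advB virus c k < virus.length := by
        have : advB virus c k = k := by unfold advB; exact dif_neg hk
        omega
      rw [if_neg hadv1, if_neg hadv0]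
      have : (k + 1 + n : Nat) = (k + (n + 1) : Nat) := by omega
      rw [this]

-- A's outer fold after a failure: str never changes again
theorem foldA_fail (virus pone : List Char) :
    ∀ (rest : List Char) (k : Int) (s : List Char), (virus.length : Int) ≤ k →
      (rest.foldl (stepA virus pone) (k, s)).2 = s := by
  intro rest
  induction rest with
  | nil => intro k s _; rfl
  | cons c t ih =>
    intro k s h
    simp only [List.foldl_cons]
    by_cases hsub : pone.all (fun ch => virus.contains ch) = true
    · have h1 : stepA virus pone (k, s) c = (k + virus.length, s) := by
        unfold stepA
        rw [if_pos hsub, innerA_fail virus c virus.length k s (by omega)]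
      rw [h1]
      exact ih (k + virus.length) s (by omega)
    · have h1 : stepA virus pone (k, s) c = (k, s) := by
        unfold stepA
        rw [if_neg hsub]
      rw [h1]
      exact ih k s h

-- the main invariant: A's fold tracks B's scan (matched on success, shorter str on failure)
theorem foldA_main (virus pone : List Char)
    (hsub : pone.all (fun ch => virus.contains ch) = true) :
    ∀ (rest : List Char) (k : Nat) (s : List Char), k ≤ virus.length →
      (matchesB virus rest k = true →
        (rest.foldl (stepA virus pone) ((k : Int), s)).2 = s ++ rest) ∧
      (matchesB virus rest k = false →
        (rest.foldl (stepA virus pone) ((k : Int), s)).2.length < s.length + rest.length) := by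
  intro rest
  induction rest with
  | nil =>
    intro k s _
    constructor
    · intro _; simp
    · intro h; simp [matchesB] at h
  | cons c t ih =>
    intro k s hk
    have h1 : stepA virus pone ((k : Int), s) c =
        (if advB virus c k < virus.length then (((advB virus c k : Nat) : Int), s ++ [c])
         else (((k + virus.length : Nat) : Int), s)) := by
      unfold stepA
      rw [if_pos hsub, innerA_eq virus c virus.length k s (by omega)]
    simp only [List.foldl_cons]
    rw [h1]
    by_cases hadv : advB virus c k < virus.length
    · rw [if_pos hadv]
      have := ih (advB virus c k) (s ++ [c]) (by omega)
      constructor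
      · intro hm
        unfold matchesB at hm
        rw [if_neg (by omega)] at hm
        rw [this.1 hm]; simp
      · intro hm
        unfold matchesB at hm
        rw [if_neg (by omega)] at hm
        have := this.2 hm
        simp at this ⊢
        omega
    · rw [if_neg hadv]
      have hVle := advB_le virus c k hk
      have hV : advB virus c k = virus.length := by omega
      constructor
      · intro hm
        unfold matchesB at hm
        rw [if_pos hV] at hm
        exact absurd hm (by simp)
      · intro _
        have hc : ((k + virus.length : Nat) : Int) = (k : Int) + virus.length := by push_cast; ring
        rw [hc, foldA_fail virus pone t ((k : Int) + virus.length) s (by omega)]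
        simp

-- matchesB only succeeds when every character occurs in the virus string
theorem matchesB_subset (virus : List Char) :
    ∀ (l : List Char) (k : Nat), k ≤ virus.length → matchesB virus l k = true →
      ∀ c ∈ l, c ∈ virus := by
  intro l
  induction l with
  | nil => intro k _ _ c hc; simp at hc
  | cons c t ih =>
    intro k hk hm d hd
    unfold matchesB at hm
    by_cases hadv : advB virus c k = virus.length
    · rw [if_pos hadv] at hm; exact absurd hm (by simp)
    · rw [if_neg hadv] at hm
      have hlt : advB virus c k < virus.length := by
        have := advB_le virus c k hk; omega
      rcases List.mem_cons.mp hd with hd | hd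
      · exact hd ▸ advB_mem virus c k hlt
      · exact ih (advB virus c k) (by omega) hm d hd

theorem classify_eq (virus pone : List Char) :
    classifyA virus pone =
      (if matchesB virus pone 0 then "POSITIVE" else "NEGATIVE") := by
  unfold classifyA
  by_cases hsub : pone.all (fun ch => virus.contains ch) = true
  · have h0 : ((0 : Nat) : Int) = (0 : Int) := rfl
    have := foldA_main virus pone hsub pone 0 [] (by omega)
    rw [h0] at this
    by_cases hm : matchesB virus pone 0 = true
    · rw [if_pos hm]
      have := this.1 hm
      simp at this
      simp [this]
    · rw [if_neg hm]
      have := this.2 (by simpa using hm)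
      simp at this
      have hne : pone ≠ (pone.foldl (stepA virus pone) (0, [])).2 := by
        intro he
        rw [← he] at this
        omega
      simp [hne]
  · -- subset fails: str stays [], and matchesB fails unless pone is empty
    have hstep : ∀ st c, stepA virus pone st c = st := by
      intro st c
      unfold stepA
      rw [if_neg hsub]
    have hfold : ∀ l : List Char, l.foldl (stepA virus pone) ((0 : Int), ([] : List Char)) = (0, []) := by
      intro l
      induction l with
      | nil => rfl
      | cons c t iht =>
        rw [List.foldl_cons, hstep]
        exact iht
    rw [hfold pone]
    cases pone with
    | nil => simp [matchesB]
    | cons c t =>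
      have hmem : ¬ (∀ d ∈ c :: t, d ∈ virus) := by
        simp only [List.all_eq_true] at hsub
        intro hall
        exact hsub (fun d hd => by simpa [List.contains_iff_mem] using hall d hd)
      have hm : matchesB virus (c :: t) 0 = false := by
        cases h : matchesB virus (c :: t) 0
        · rfl
        · exact absurd (matchesB_subset virus (c :: t) 0 (by omega) h) hmem
      simp [hm]

theorem foldl_append_map (f : String → String) :
    ∀ (l : List String) (acc : List String),
      l.foldl (fun arr pone => arr ++ [f pone]) acc = acc ++ l.map f := by
  intro l
  induction l with
  | nil => intro acc; simp
  | cons x t ih => intro acc; simp [ih]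

-- ===== VERDICT (by name: the statement is the Claim_ definition above) =====
theorem checkPatienceStatus_spec : Claim_equal_checkPatienceStatus := by
  intro viruscompo inpone _
  unfold Spec_checkPatienceStatus checkPatienceStatus checkPatienceStatus_alt
  rw [foldl_append_map (fun pone => classifyA viruscompo.toList pone.toList) inpone []]
  simp only [List.nil_append]
  apply List.map_congr_left
  intro pone _
  exact classify_eq viruscompo.toList pone.toList
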